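-- pv_equiv track=rewrite | github.com/RitaRamo/rerank | src/meshed-memory-transformer/train.py | my_tokenize
-- ===== SOURCE A (Python) =====
-- def my_tokenize(corpus):
--     if isinstance(corpus, list) or isinstance(corpus, tuple):
--         if isinstance(corpus[0], list) or isinstance(corpus[0], tuple):
--             corpus = {i:c for i, c in enumerate(corpus)}
--         else:
--             corpus = {i: [c, ] for i, c in enumerate(corpus)}
--
--     # prepare data for PTB Tokenizer
--     tokenized_corpus = {}
--     image_id = [k for k, v in list(corpus.items()) for _ in range(len(v))]
--     sentences = [c for k, v in corpus.items() for c in v]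
--     lines = sentences
--
--     # create dictionary for tokenized captions
--     for k, line in zip(image_id, lines):
--         if not k in tokenized_corpus:
--             tokenized_corpus[k] = []
--         tokenized_caption = line
--         tokenized_corpus[k].append(tokenized_caption)
--
--     return tokenized_corpus
-- ===== SOURCE B (Python) =====
-- def my_tokenize(corpus):
--     if isinstance(corpus, list) or isinstance(corpus, tuple):
--         if isinstance(corpus[0], list) or isinstance(corpus[0], tuple):
--             corpus = {i: c for i, c in enumerate(corpus)}
--         else:
--             corpus = {i: [c, ] for i, c in enumerate(corpus)}
--     # regroup directly: each id's captions are already together in order;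
--     # ids with no captions produce no entry (they never appear in the zipped stream)
--     return {k: [c for c in v] for k, v in corpus.items() if v}
-- ===== Notes on version B (the rewrite author's own statement) =====
-- stated objective: simpler
-- what changed: B drops A's flatten-into-parallel-id/sentence-lists-then-zip-and-regroup phases and builds the result dict in one direct guarded comprehension over the normalized dict's items, copying each caption list.
import Mathlib
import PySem

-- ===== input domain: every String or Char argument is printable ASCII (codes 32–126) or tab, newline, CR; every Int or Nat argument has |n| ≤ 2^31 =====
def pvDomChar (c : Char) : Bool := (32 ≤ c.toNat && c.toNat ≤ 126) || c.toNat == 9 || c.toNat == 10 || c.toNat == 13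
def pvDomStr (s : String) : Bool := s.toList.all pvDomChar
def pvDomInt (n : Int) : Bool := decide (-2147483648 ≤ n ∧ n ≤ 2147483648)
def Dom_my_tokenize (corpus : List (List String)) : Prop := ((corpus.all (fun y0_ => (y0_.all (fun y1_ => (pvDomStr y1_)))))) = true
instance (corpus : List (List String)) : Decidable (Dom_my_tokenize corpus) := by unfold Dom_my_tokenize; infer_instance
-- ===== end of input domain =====

-- B replaces A's flatten-to-parallel-lists-then-zip-and-regroup with one direct pass over the
-- normalized dict (simpler); equivalence is about the return value only.

-- ===== PORT A =====
-- corpus is List (List String), so the isinstance tests take the list branches.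
def my_tokenize (corpus : List (List String)) : List (Int × List String) :=
  match corpus with
  | [] => []      -- corpus[0] raises IndexError here; excluded by Pre_my_tokenize
  | _ :: _ =>
    -- corpus = {i: c for i, c in enumerate(corpus)}   (dict comprehension = insert loop)
    let d : PySem.Dict Int (List String) :=
      (PySem.List.enumerate corpus).foldl (fun d kv => d.insert kv.1 kv.2) PySem.Dict.empty
    let image_id : List Int :=
      d.items.flatMap (fun kv => (PySem.List.pyRange 0 kv.2.length 1).map (fun _ => kv.1))
    let sentences : List String := d.items.flatMap (fun kv => kv.2)
    let lines := sentences
    let tc : PySem.Dict Int (List String) :=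
      (image_id.zip lines).foldl
        (fun tc p =>
          let tc := if tc.contains p.1 then tc else tc.insert p.1 []
          tc.modify p.1 [] (fun l => l ++ [p.2]))
        PySem.Dict.empty
    tc.items

-- ===== PORT B =====
def my_tokenize_alt (corpus : List (List String)) : List (Int × List String) :=
  match corpus with
  | [] => []      -- corpus[0] raises IndexError here; excluded by Pre_my_tokenize
  | _ :: _ =>
    ((PySem.List.enumerate corpus).filter (fun kv => !kv.2.isEmpty)).map
      (fun kv => (kv.1, kv.2.map (fun c => c)))

-- ===== PRECONDITION & SPEC =====
-- Pre_ excludes only the empty corpus, on which both A and B raise IndexError at corpus[0].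
def Pre_my_tokenize (corpus : List (List String)) : Prop := corpus ≠ []
instance (corpus : List (List String)) : Decidable (Pre_my_tokenize corpus) := by
  unfold Pre_my_tokenize; infer_instance
def pvWitness_my_tokenize : List (List String) := [["a"], ["b", "c"]]

def Spec_my_tokenize (corpus : List (List String)) (out : List (Int × List String)) : Prop :=
  out = my_tokenize_alt corpus
instance (corpus : List (List String)) (out : List (Int × List String)) :
    Decidable (Spec_my_tokenize corpus out) := by unfold Spec_my_tokenize; infer_instance

-- ===== CLAIM =====
def Claim_equal_my_tokenize : Prop :=
  ∀ (corpus : List (List String)), Dom_my_tokenize corpus → Pre_my_tokenize corpus →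
    Spec_my_tokenize corpus (my_tokenize corpus)

-- ===== LEMMAS AND PROOFS =====

-- the caption pairs, grouped by key, in order
def pvPairs (l : List (Int × List String)) : List (Int × String) :=
  l.flatMap (fun kv => kv.2.map (fun c => (kv.1, c)))

lemma pv_zip_chunk (k : Int) (v : List String) :
    (List.replicate v.length k).zip v = v.map (fun c => (k, c)) := by
  induction v with
  | nil => rfl
  | cons c v ih => simp [List.replicate_succ, ih]

lemma pv_zip (l : List (Int × List String)) :
    (l.flatMap (fun kv => (PySem.List.pyRange 0 kv.2.length 1).map (fun _ => kv.1))).zip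
        (l.flatMap (fun kv => kv.2))
      = pvPairs l := by
  induction l with
  | nil => rfl
  | cons kv l ih =>
    simp only [List.flatMap_cons, pvPairs]
    rw [List.zip_append (by simp)]
    have : ((PySem.List.pyRange 0 (kv.2.length : Int) 1).map (fun _ => kv.1)).zip kv.2
        = kv.2.map (fun c => (kv.1, c)) := by
      have hlen : ((PySem.List.pyRange 0 (kv.2.length : Int) 1).map (fun _ => kv.1))
          = List.replicate kv.2.length kv.1 := by
        apply List.ext_getElem <;> simp
      rw [hlen, pv_zip_chunk]
    rw [this, ih]
    rfl

lemma pv_mem_fst_pairs {l : List (Int × List String)} {k : Int}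
    (h : k ∈ (pvPairs l).map (·.1)) : k ∈ l.map (·.1) := by
  simp only [pvPairs, List.map_flatMap, List.mem_flatMap, List.mem_map, List.map_map] at h
  obtain ⟨kv, hkv, hk⟩ := h
  obtain ⟨c, _, rfl⟩ := by simpa using hk
  simp only [List.mem_map]
  exact ⟨kv, hkv, rfl⟩

lemma pv_ofList_const (k : Int) (v : List String) :
    PySem.Set.ofList (k :: v.map (fun _ => k)) = [k] := by
  induction v with
  | nil => rfl
  | cons c v ih =>
    simp only [List.map_cons]
    rw [PySem.Set.ofList_cons] at ih ⊢
    simp_all [PySem.Set.ofList_cons, PySem.Set.discard]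

lemma pv_main (l : List (Int × List String)) (h : (l.map (·.1)).Nodup) :
    (PySem.Set.ofList ((pvPairs l).map (·.1))).map
        (fun k => (k, ((pvPairs l).filter (fun p => p.1 == k)).map (·.2)))
      = l.filter (fun kv => !kv.2.isEmpty) := by
  induction l with
  | nil => rfl
  | cons kv l ih =>
    obtain ⟨k0, v0⟩ := kv
    simp only [List.map_cons, List.nodup_cons] at h
    obtain ⟨hk0, hnd⟩ := h
    have hknot : k0 ∉ (pvPairs l).map (·.1) := fun hm => hk0 (pv_mem_fst_pairs hm)
    have hpc : pvPairs ((k0, v0) :: l) = v0.map (fun c => (k0, c)) ++ pvPairs l := rfl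
    cases v0 with
    | nil =>
      have h1 : pvPairs ((k0, ([] : List String)) :: l) = pvPairs l := rfl
      rw [h1]
      have h2 : List.filter (fun kv => !kv.2.isEmpty) ((k0, ([] : List String)) :: l)
          = List.filter (fun kv => !kv.2.isEmpty) l := by simp
      rw [h2]
      exact ih hnd
    | cons c v =>
      have hfst : (pvPairs ((k0, c :: v) :: l)).map (·.1)
          = (k0 :: (v.map (fun _ => k0))) ++ (pvPairs l).map (·.1) := by
        simp [hpc]
      rw [hfst, PySem.Set.ofList_append, pv_ofList_const]
      have hupd : PySem.Set.update [k0] ((pvPairs l).map (·.1))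
          = k0 :: PySem.Set.ofList ((pvPairs l).map (·.1)) := by
        rw [PySem.Set.update_eq_append_filter]
        have : (PySem.Set.ofList ((pvPairs l).map (·.1))).filter
            (fun y => !(PySem.Set.contains [k0] y)) = PySem.Set.ofList ((pvPairs l).map (·.1)) := by
          apply List.filter_eq_self.mpr
          intro y hy
          have hyk : y ≠ k0 := by
            intro rfl_eq; subst rfl_eq
            exact hknot ((PySem.Set.mem_ofList _ _).mp hy)
          simp [PySem.Set.contains, hyk]
        rw [this]; rfl
      rw [hupd, List.map_cons]
      -- head element
      have hhead : ((pvPairs ((k0, c :: v) :: l)).filter (fun p => p.1 == k0)).map (·.2)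
          = c :: v := by
        rw [hpc, List.filter_append]
        have hA : ((c :: v).map (fun cc => (k0, cc))).filter (fun p => p.1 == k0)
            = (c :: v).map (fun cc => (k0, cc)) := by
          apply List.filter_eq_self.mpr; intro p hp
          simp only [List.mem_map] at hp
          obtain ⟨cc, _, rfl⟩ := hp
          simp
        have hB : (pvPairs l).filter (fun p => p.1 == k0) = [] := by
          apply List.filter_eq_nil_iff.mpr
          intro p hp hpk
          exact hknot (List.mem_map.mpr ⟨p, hp, by simpa using hpk⟩)
        rw [hA, hB, List.append_nil, List.map_map]
        simp
      rw [hhead]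
      -- tail
      have htail : (PySem.Set.ofList ((pvPairs l).map (·.1))).map
            (fun k => (k, ((pvPairs ((k0, c :: v) :: l)).filter (fun p => p.1 == k)).map (·.2)))
          = (PySem.Set.ofList ((pvPairs l).map (·.1))).map
            (fun k => (k, ((pvPairs l).filter (fun p => p.1 == k)).map (·.2))) := by
        apply List.map_congr_left
        intro k hk
        have hkne : k ≠ k0 := by
          intro rfl_eq; subst rfl_eq
          exact hknot ((PySem.Set.mem_ofList _ _).mp hk)
        have : (pvPairs ((k0, c :: v) :: l)).filter (fun p => p.1 == k)
            = (pvPairs l).filter (fun p => p.1 == k) := by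
          rw [hpc, List.filter_append]
          have : ((c :: v).map (fun cc => (k0, cc))).filter (fun p => p.1 == k) = [] := by
            apply List.filter_eq_nil_iff.mpr
            intro p hp hpk
            simp only [List.mem_map] at hp
            obtain ⟨cc, _, rfl⟩ := hp
            exact hkne (Eq.symm (by simpa using hpk))
          rw [this, List.nil_append]
        rw [this]
      rw [htail, ih hnd]
      simp

lemma pv_nodup_enum (corpus : List (List String)) :
    ((PySem.List.enumerate corpus).map (·.1)).Nodup := by
  have hp := PySem.List.pairwise_lt_enumerate (xs := corpus) (s := 0)
  exact List.Pairwise.imp (fun h => h) (List.pairwise_map.2 (hp.imp (fun h => ne_of_lt h)))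

lemma pv_items_d (corpus : List (List String)) :
    ((PySem.List.enumerate corpus).foldl (fun d kv => d.insert kv.1 kv.2)
        (PySem.Dict.empty : PySem.Dict Int (List String))).items
      = PySem.List.enumerate corpus := by
  have h := PySem.Dict.items_foldl_insert_fresh (l := PySem.List.enumerate corpus)
      (k := fun kv => kv.1) (v := fun kv => kv.2)
      (d := (PySem.Dict.empty : PySem.Dict Int (List String)))
      (by intro a _; simp [PySem.Dict.contains_empty])
      (pv_nodup_enum corpus)
  simpa using h

lemma pv_step (tc : PySem.Dict Int (List String)) (k : Int) (x : String) :
    (if tc.contains k then tc else tc.insert k []).modify k [] (fun l => l ++ [x])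
      = tc.modify k [] (fun l => l ++ [x]) := by
  by_cases h : tc.contains k
  · simp [h]
  · simp only [h, Bool.false_eq_true, if_false, PySem.Dict.modify]
    rw [PySem.Dict.getD_insert_self, PySem.Dict.insert_insert_self]
    have h2 : tc.getD k [] = [] := PySem.Dict.getD_of_not_contains tc [] (by simpa using h)
    rw [h2]

lemma pv_A_eq (corpus : List (List String)) (h : corpus ≠ []) :
    my_tokenize corpus
      = (PySem.List.enumerate corpus).filter (fun kv => !kv.2.isEmpty) := by
  obtain ⟨x, t, rfl⟩ : ∃ x t, corpus = x :: t := by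
    cases corpus with | nil => exact absurd rfl h | cons x t => exact ⟨x, t, rfl⟩
  show (((((PySem.List.enumerate (x :: t)).foldl (fun d kv => d.insert kv.1 kv.2) PySem.Dict.empty).items.flatMap
      (fun kv => (PySem.List.pyRange 0 kv.2.length 1).map (fun _ => kv.1))).zip
      (((PySem.List.enumerate (x :: t)).foldl (fun d kv => d.insert kv.1 kv.2) PySem.Dict.empty).items.flatMap
      (fun kv => kv.2))).foldl
        (fun tc p =>
          let tc := if tc.contains p.1 then tc else tc.insert p.1 []
          tc.modify p.1 [] (fun l => l ++ [p.2]))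
        PySem.Dict.empty).items
      = (PySem.List.enumerate (x :: t)).filter (fun kv => !kv.2.isEmpty)
  rw [pv_items_d, pv_zip]
  have hstep : (fun (tc : PySem.Dict Int (List String)) (p : Int × String) =>
        let tc := if tc.contains p.1 then tc else tc.insert p.1 []
        tc.modify p.1 [] (fun l => l ++ [p.2]))
      = fun (tc : PySem.Dict Int (List String)) p => tc.modify p.1 [] (fun l => l ++ [p.2]) := by
    funext tc p
    exact pv_step tc p.1 p.2
  rw [hstep]
  have hkeys : ((pvPairs (PySem.List.enumerate (x :: t))).foldl
        (fun (tc : PySem.Dict Int (List String)) p => tc.modify p.1 [] (fun l => l ++ [p.2]))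
        PySem.Dict.empty).keys
      = PySem.Set.ofList ((pvPairs (PySem.List.enumerate (x :: t))).map (·.1)) := by
    have h := PySem.Dict.keys_foldl_modify_key (l := pvPairs (PySem.List.enumerate (x :: t)))
      (key := fun p => p.1) (d0 := ([] : List String)) (f := fun _ p w => w ++ [p.2])
      (d := PySem.Dict.empty)
    rw [h, PySem.Dict.keys_empty, PySem.Set.update_nil_left]
  have hnd : ((pvPairs (PySem.List.enumerate (x :: t))).foldl
        (fun (tc : PySem.Dict Int (List String)) p => tc.modify p.1 [] (fun l => l ++ [p.2]))
        PySem.Dict.empty).keys.Nodup := by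
    rw [hkeys]; exact PySem.Set.nodup_ofList _
  rw [PySem.Dict.items_eq_map_keys _ hnd ([] : List String), hkeys]
  have hgetD : ∀ k, ((pvPairs (PySem.List.enumerate (x :: t))).foldl
        (fun (tc : PySem.Dict Int (List String)) p => tc.modify p.1 [] (fun l => l ++ [p.2]))
        PySem.Dict.empty).getD k []
      = ((pvPairs (PySem.List.enumerate (x :: t))).filter (fun p => p.1 == k)).map (·.2) := by
    intro k
    have h := PySem.Dict.getD_foldl_modify_append (pvPairs (PySem.List.enumerate (x :: t)))
      (PySem.Dict.empty) k
    simpa [PySem.Dict.getD_empty] using h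
  have hmap : (PySem.Set.ofList ((pvPairs (PySem.List.enumerate (x :: t))).map (·.1))).map
        (fun k => (k, ((pvPairs (PySem.List.enumerate (x :: t))).foldl
          (fun (tc : PySem.Dict Int (List String)) p => tc.modify p.1 [] (fun l => l ++ [p.2]))
          PySem.Dict.empty).getD k []))
      = (PySem.Set.ofList ((pvPairs (PySem.List.enumerate (x :: t))).map (·.1))).map
        (fun k => (k, ((pvPairs (PySem.List.enumerate (x :: t))).filter (fun p => p.1 == k)).map (·.2))) := by
    apply List.map_congr_left
    intro k _
    rw [hgetD]
  rw [hmap]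
  exact pv_main _ (pv_nodup_enum (x :: t))

lemma pv_B_eq (corpus : List (List String)) (h : corpus ≠ []) :
    my_tokenize_alt corpus
      = (PySem.List.enumerate corpus).filter (fun kv => !kv.2.isEmpty) := by
  obtain ⟨x, t, rfl⟩ : ∃ x t, corpus = x :: t := by
    cases corpus with | nil => exact absurd rfl h | cons x t => exact ⟨x, t, rfl⟩
  show ((PySem.List.enumerate (x :: t)).filter (fun kv => !kv.2.isEmpty)).map
      (fun kv => (kv.1, kv.2.map (fun c => c)))
      = (PySem.List.enumerate (x :: t)).filter (fun kv => !kv.2.isEmpty)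
  simp

-- ===== VERDICT =====
theorem my_tokenize_spec : Claim_equal_my_tokenize := by
  intro corpus _ hpre
  unfold Spec_my_tokenize
  rw [pv_A_eq corpus hpre, pv_B_eq corpus hpre]
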